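-- pv_equiv track=rewrite | github.com/aryoppa/item-response-theory | src/service/apriori.py | generate_single_items
-- ===== SOURCE A (Python) =====
-- def generate_single_items(transactions):
--     """
--     Generate unique single-item candidates from the transactions.
--
--     Args:
--         transactions (list of list): The dataset of transactions.
--
--     Returns:
--         list: A list of unique single-item candidates.
--     """
--     C1 = []
--     for transaction in transactions:
--         for item in transaction:
--             if [item] not in C1:
--                 C1.append([item])
--     C1.sort()
--     return C1
-- ===== SOURCE B (Python) =====
-- def generate_single_items(transactions):
--     """Flatten all transactions, sort once, then dedup adjacent equal items
--     in a single pass, wrapping each kept item as a singleton list."""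
--     flat = []
--     for transaction in transactions:
--         flat.extend(transaction)
--     flat.sort()
--     out = []
--     for x in flat:
--         if not out or out[-1] != [x]:
--             out.append([x])
--     return out
-- ===== Notes on version B (the rewrite author's own statement) =====
-- stated objective: faster
-- what changed: Instead of a quadratic membership scan (`[item] not in C1`) per item followed by a sort, B flattens all transactions, sorts the flat item list once, and deduplicates by comparing adjacent elements in a single pass.
import Mathlib
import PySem

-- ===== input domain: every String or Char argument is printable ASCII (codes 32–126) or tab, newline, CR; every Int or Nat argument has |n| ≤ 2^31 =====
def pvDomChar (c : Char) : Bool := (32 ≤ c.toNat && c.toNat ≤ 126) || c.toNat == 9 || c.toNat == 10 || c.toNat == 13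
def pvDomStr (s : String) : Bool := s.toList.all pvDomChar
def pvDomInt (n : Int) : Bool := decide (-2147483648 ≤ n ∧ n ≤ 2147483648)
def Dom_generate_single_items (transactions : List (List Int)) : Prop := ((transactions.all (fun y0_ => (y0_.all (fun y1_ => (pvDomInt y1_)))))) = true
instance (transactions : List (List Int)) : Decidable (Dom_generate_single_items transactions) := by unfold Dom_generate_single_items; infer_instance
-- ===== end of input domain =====

-- B replaces A's per-item linear membership scan by flatten + one sort + adjacent dedup (faster).
-- A mutates nothing observable; equivalence is about the return value.

-- ===== PORT A =====
def generate_single_items (transactions : List (List Int)) : List (List Int) :=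
  let C1 := transactions.foldl
    (fun C1 transaction =>
      transaction.foldl (fun C1 item => if [item] ∈ C1 then C1 else C1 ++ [[item]]) C1) []
  PySem.List.sorted C1 (fun x => x) false

-- ===== PORT B =====
def generate_single_items_alt (transactions : List (List Int)) : List (List Int) :=
  let flat := transactions.foldl (fun acc transaction => acc ++ transaction) []
  let s := PySem.List.sorted flat (fun x => x) false
  s.foldl
    (fun out x => if out = [] ∨ PySem.List.pyGet? out (-1) ≠ some [x] then out ++ [[x]] else out) []

-- ===== PRECONDITION & SPEC =====
def Spec_generate_single_items (transactions : List (List Int)) (out : List (List Int)) : Prop := out = generate_single_items_alt transactions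
instance (transactions : List (List Int)) (out : List (List Int)) : Decidable (Spec_generate_single_items transactions out) := by unfold Spec_generate_single_items; infer_instance

-- ===== CLAIM (what is proved, stated in full; the proofs are below) =====
def Claim_equal_generate_single_items : Prop := ∀ (transactions : List (List Int)), Dom_generate_single_items transactions → Spec_generate_single_items transactions (generate_single_items transactions)

-- ===== LEMMAS AND PROOFS =====

-- A's inner step / B's step, named for the proofs
def pvAstep (C1 : List (List Int)) (item : Int) : List (List Int) :=
  if [item] ∈ C1 then C1 else C1 ++ [[item]]

def pvBstep (out : List (List Int)) (x : Int) : List (List Int) :=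
  if out = [] ∨ PySem.List.pyGet? out (-1) ≠ some [x] then out ++ [[x]] else out

theorem pvFoldlAppend (L : List (List Int)) (acc : List Int) :
    L.foldl (fun acc t => acc ++ t) acc = acc ++ L.flatten := by
  induction L generalizing acc with
  | nil => simp
  | cons t L ih => simp [List.foldl_cons, ih]

theorem pvMemAstep (acc : List (List Int)) (x : Int) (l : List Int) :
    l ∈ pvAstep acc x ↔ l ∈ acc ∨ l = [x] := by
  unfold pvAstep
  split_ifs with h
  · exact ⟨Or.inl, by rintro (h1 | rfl); exacts [h1, h]⟩
  · simp

theorem pvMemAstepFold (xs : List Int) (acc : List (List Int)) (l : List Int) :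
    l ∈ xs.foldl pvAstep acc ↔ l ∈ acc ∨ ∃ x ∈ xs, l = [x] := by
  induction xs generalizing acc with
  | nil => simp
  | cons x xs ih =>
    rw [List.foldl_cons, ih, pvMemAstep]
    constructor
    · rintro ((h1 | rfl) | ⟨y, hy, rfl⟩)
      · exact Or.inl h1
      · exact Or.inr ⟨x, by simp⟩
      · exact Or.inr ⟨y, by simp [hy]⟩
    · rintro (h1 | ⟨y, hy, rfl⟩)
      · exact Or.inl (Or.inl h1)
      · rcases List.mem_cons.1 hy with rfl | hy
        · exact Or.inl (Or.inr rfl)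
        · exact Or.inr ⟨y, hy, rfl⟩

theorem pvNodupAstepFold (xs : List Int) (acc : List (List Int)) (h : acc.Nodup) :
    (xs.foldl pvAstep acc).Nodup := by
  induction xs generalizing acc with
  | nil => simpa
  | cons x xs ih =>
    rw [List.foldl_cons]
    apply ih
    by_cases hx : [x] ∈ acc
    · simpa [pvAstep, hx]
    · simp only [pvAstep, if_neg hx, List.nodup_append]
      refine ⟨h, List.nodup_singleton _, ?_⟩
      intro a ha b hb
      simp only [List.mem_singleton] at hb
      subst hb
      exact fun e => hx (e ▸ ha)

theorem pvPyGetNegOne (l : List (List Int)) : PySem.List.pyGet? l (-1) = l.getLast? := by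
  cases l with
  | nil => rfl
  | cons a l =>
    simp [PySem.List.pyGet?, PySem.List.pyIdx?, List.getLast?_eq_getElem?]

theorem pvLastLe (zs : List Int) (m : Int) (hp : zs.Pairwise (· < ·))
    (hl : zs.getLast? = some m) : ∀ z ∈ zs, z ≤ m := by
  induction zs with
  | nil => simp at hl
  | cons a zs ih =>
    cases zs with
    | nil =>
      simp at hl
      simp [hl]
    | cons b zs =>
      rw [List.getLast?_cons_cons] at hl
      intro z hz
      rcases List.mem_cons.1 hz with rfl | hz
      · have hb : z < b := (List.pairwise_cons.1 hp).1 b (by simp)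
        have := ih hp.tail hl b (by simp)
        omega
      · exact ih hp.tail hl z hz

-- main invariant of B's dedup pass over a sorted list
theorem pvBFold (xs : List Int) (zs : List Int)
    (hxs : xs.Pairwise (· ≤ ·)) (hzs : zs.Pairwise (· < ·))
    (hle : ∀ y ∈ xs, ∀ z ∈ zs, z ≤ y) :
    ∃ ws : List Int,
      xs.foldl pvBstep (zs.map (fun a => [a])) = ws.map (fun a => [a]) ∧
      ws.Pairwise (· < ·) ∧ (∀ a, a ∈ ws ↔ a ∈ zs ∨ a ∈ xs) := by
  induction xs generalizing zs with
  | nil => exact ⟨zs, rfl, hzs, by simp⟩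
  | cons x xs ih =>
    rw [List.foldl_cons]
    have hxhd : ∀ y ∈ xs, x ≤ y := (List.pairwise_cons.1 hxs).1
    by_cases hz : zs = []
    · subst hz
      have hcond : pvBstep ([] : List (List Int)) x = [[x]] := by simp [pvBstep]
      rw [List.map_nil, hcond]
      obtain ⟨ws, h1, h2, h3⟩ := ih [x] hxs.tail (by simp)
        (by intro y hy z hzm; simp at hzm; subst hzm; exact hxhd y hy)
      exact ⟨ws, by simpa using h1, h2, by intro a; rw [h3]; simp⟩
    · obtain ⟨m, hm⟩ := Option.isSome_iff_exists.1 (List.getLast?_isSome.2 hz)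
      have hmem : m ∈ zs := List.mem_of_getLast? hm
      have hlast : (zs.map (fun a => [a])).getLast? = some [m] := by
        rw [List.getLast?_map, hm]; rfl
      have hmle : m ≤ x := hle x (by simp) m hmem
      by_cases hmx : m = x
      · have hcond : pvBstep (zs.map (fun a => [a])) x = zs.map (fun a => [a]) := by
          simp [pvBstep, pvPyGetNegOne, hlast, hmx]
          intro h; exact absurd (by simpa using h) (by simpa using hz)
        rw [hcond]
        obtain ⟨ws, h1, h2, h3⟩ := ih zs hxs.tail hzs
          (fun y hy z hzm => hle y (by simp [hy]) z hzm)
        refine ⟨ws, h1, h2, ?_⟩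
        intro a; rw [h3]
        constructor
        · tauto
        · rintro (h | h)
          · exact Or.inl h
          · rcases List.mem_cons.1 h with rfl | h
            · exact Or.inl (hmx ▸ hmem)
            · exact Or.inr h
      · have hcond : pvBstep (zs.map (fun a => [a])) x = (zs ++ [x]).map (fun a => [a]) := by
          simp [pvBstep, pvPyGetNegOne, hlast, hmx]
        rw [hcond]
        have hzx : ∀ z ∈ zs, z < x := by
          intro z hzm
          have h1 := pvLastLe zs m hzs hm z hzm
          omega
        obtain ⟨ws, h1, h2, h3⟩ := ih (zs ++ [x]) hxs.tail
          (by
            rw [List.pairwise_append]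
            exact ⟨hzs, by simp, by intro a ha b hb; simp at hb; subst hb; exact hzx a ha⟩)
          (by
            intro y hy z hzm
            rcases List.mem_append.1 hzm with h | h
            · exact hle y (by simp [hy]) z h
            · simp at h; subst h; exact hxhd y hy)
        refine ⟨ws, h1, h2, ?_⟩
        intro a; rw [h3]; simp; tauto

theorem pvSortedInstSwap (C1 : List (List Int)) :
    PySem.List.sorted C1 (fun x => x) false =
      @PySem.List.sorted (List Int) (List Int) List.instLinearOrder.toLT
        LinearOrder.toDecidableLT C1 (fun x => x) false := by
  rw [PySem.List.sorted_eq_foldl_insertBy C1 (fun x => x),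
      @PySem.List.sorted_eq_foldl_insertBy _ _ List.instLinearOrder.toLT
        LinearOrder.toDecidableLT C1 (fun x => x)]
  congr 1
  funext acc x
  congr 1
  funext a b
  exact decide_eq_decide.2 (List.lt_iff_lex_lt a b)

theorem generate_single_items_eq (transactions : List (List Int)) :
    generate_single_items transactions = generate_single_items_alt transactions := by
  unfold generate_single_items generate_single_items_alt
  simp only []
  set flat := transactions.flatten with hflat
  -- identify both flattenings
  have hA : transactions.foldl
      (fun C1 transaction =>
        transaction.foldl (fun C1 item => if [item] ∈ C1 then C1 else C1 ++ [[item]]) C1) []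
      = flat.foldl pvAstep [] := by
    rw [← List.foldl_flatten]; rfl
  have hB : transactions.foldl (fun acc t => acc ++ t) [] = flat := by
    rw [pvFoldlAppend, List.nil_append]
  rw [hA, hB]
  set C1 := flat.foldl pvAstep [] with hC1
  set s := PySem.List.sorted flat (fun x => x) false with hs
  obtain ⟨ws, h1, h2, h3⟩ := pvBFold s []
    (by simpa using PySem.List.sorted_pairwise flat (fun x => x))
    (by simp) (by simp)
  have hBout : s.foldl pvBstep [] = ws.map (fun a => [a]) := by simpa using h1
  have hmemws : ∀ a, a ∈ ws ↔ a ∈ flat := by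
    intro a
    rw [h3]
    simp [hs, PySem.List.mem_sorted]
  -- A's result by uniqueness of the strictly sorted arrangement
  rw [pvSortedInstSwap]
  show _ = List.foldl pvBstep [] s
  rw [hBout]
  apply PySem.List.sorted_eq_of_perm_of_pairwise_lt
  · rw [List.perm_ext_iff_of_nodup]
    · intro l
      rw [pvMemAstepFold]
      simp only [List.mem_map]
      constructor
      · rintro ⟨a, ha, rfl⟩
        exact Or.inr ⟨a, (hmemws a).1 ha, rfl⟩
      · rintro (h | ⟨a, ha, rfl⟩)
        · simp at h
        · exact ⟨a, (hmemws a).2 ha, rfl⟩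
    · exact List.Nodup.map (fun a b h => by simpa using h) h2.nodup
    · exact pvNodupAstepFold flat [] (by simp)
  · rw [List.pairwise_map]
    exact h2.imp (fun {a b} h => List.Lex.rel h)

-- ===== VERDICT (by name: the statement is the Claim_ definition above) =====
theorem generate_single_items_spec : Claim_equal_generate_single_items := by
  intro transactions _
  unfold Spec_generate_single_items
  exact generate_single_items_eq transactions
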